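-- pv_equiv track=rewrite | github.com/mandiners/advent_of_code | src/_2020/day_07/part_2.py | collect_bags_in_shiny_gold_bag
-- ===== SOURCE A (Python) =====
-- def collect_bags_in_shiny_gold_bag(bag, bags, results=None, multiplier=1):
--     if not results:
--         results = []
--
--     for name, value in bag.items():
--         result = int(value) * multiplier
--         results.append(result)
--
--         if value:
--             collect_bags_in_shiny_gold_bag(
--                 bags[name],
--                 bags,
--                 results,
--                 result
--             )
--
--     return results
-- ===== SOURCE B (Python) =====
-- def collect_bags_in_shiny_gold_bag(bag, bags, results=None, multiplier=1):
--     if not results: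
--         results = []
--     stack = [(name, value, multiplier) for name, value in bag.items()][::-1]
--     while stack:
--         name, value, mult = stack.pop()
--         result = int(value) * mult
--         results.append(result)
--         if value:
--             stack.extend((n, v, result) for n, v in reversed(list(bags[name].items())))
--     return results
-- ===== Notes on version B (the rewrite author's own statement) =====
-- stated objective: alternative
-- what changed: The recursion is replaced by an explicit depth-first loop over a stack of (name, value, multiplier) edge frames, pushed in reverse so popping reproduces A's left-to-right pre-order of appends.
import Mathlib
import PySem

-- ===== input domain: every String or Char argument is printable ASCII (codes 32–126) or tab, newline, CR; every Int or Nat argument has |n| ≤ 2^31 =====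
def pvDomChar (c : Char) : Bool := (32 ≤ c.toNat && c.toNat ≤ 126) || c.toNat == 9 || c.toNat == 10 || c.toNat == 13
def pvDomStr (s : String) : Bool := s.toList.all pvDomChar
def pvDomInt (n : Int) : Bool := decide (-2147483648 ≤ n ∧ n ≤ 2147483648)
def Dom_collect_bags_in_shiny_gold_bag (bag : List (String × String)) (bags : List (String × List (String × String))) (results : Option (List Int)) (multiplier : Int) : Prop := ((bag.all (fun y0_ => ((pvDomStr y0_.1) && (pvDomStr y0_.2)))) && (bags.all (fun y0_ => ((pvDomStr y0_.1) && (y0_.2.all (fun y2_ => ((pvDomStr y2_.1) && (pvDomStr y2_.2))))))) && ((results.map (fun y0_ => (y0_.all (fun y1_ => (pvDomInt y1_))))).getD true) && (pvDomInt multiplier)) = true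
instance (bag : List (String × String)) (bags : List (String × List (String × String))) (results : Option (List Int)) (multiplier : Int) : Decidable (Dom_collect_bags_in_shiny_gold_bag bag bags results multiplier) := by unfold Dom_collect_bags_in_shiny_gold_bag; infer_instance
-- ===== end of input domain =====

-- B replaces A's recursion by an explicit stack-driven depth-first loop (same return value;
-- both Pythons append to a caller-supplied non-empty `results` list in place, identically).

-- ===== PORT A =====
-- Literal port of A's recursion. `fuel` is only a totality device (Python recursion depth
-- is unbounded); under Pre_ the initial fuel `bags.length + 1` is never exhausted.
def collectA_go (fuel : Nat) (items : List (String × String))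
    (bagsD : PySem.Dict String (PySem.Dict String String))
    (results : List Int) (multiplier : Int) : List Int :=
  match items with
  | [] => results
  | (name, value) :: rest =>
    let result := ((PySem.Int.ofStr? value).getD 0) * multiplier
    let results := results ++ [result]
    let results :=
      if value ≠ "" then
        match fuel with
        | 0 => results
        | f + 1 => collectA_go f ((bagsD.getD name PySem.Dict.empty).items) bagsD results result
      else results
    collectA_go fuel rest bagsD results multiplier
termination_by (fuel, items.length)

def collect_bags_in_shiny_gold_bag (bag : List (String × String)) (bags : List (String × List (String × String))) (results : Option (List Int)) (multiplier : Int) : List Int :=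
  let results0 := match results with | none => ([] : List Int) | some rs => rs
  let bagD := PySem.Dict.ofList bag
  let bagsD := PySem.Dict.ofList (bags.map (fun kv => (kv.1, PySem.Dict.ofList kv.2)))
  collectA_go (bags.length + 1) bagD.items bagsD results0 multiplier

-- ===== PORT B =====
-- Maximal fan-out of the bags dict; it bounds how many frames one pop can push
-- and drives the termination measure of the stack loop below.
def pvMaxFan (bagsD : PySem.Dict String (PySem.Dict String String)) : Nat :=
  bagsD.items.foldl (fun a kv => max a kv.2.items.length) 0

theorem pvFan_le_foldl (l : List (String × PySem.Dict String String)) (a : Nat) :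
    a ≤ l.foldl (fun a kv => max a kv.2.items.length) a := by
  induction l generalizing a with
  | nil => simp
  | cons kv tl ih => exact le_trans (le_max_left _ _) (ih _)

theorem pvFoldl_max_mono (l : List (String × PySem.Dict String String)) {a b : Nat} (h : a ≤ b) :
    l.foldl (fun a kv => max a kv.2.items.length) a ≤ l.foldl (fun a kv => max a kv.2.items.length) b := by
  induction l generalizing a b with
  | nil => simpa using h
  | cons kv tl ih => exact ih (max_le_max h le_rfl)

theorem pvMaxFan_of_mem (bagsD : PySem.Dict String (PySem.Dict String String))
    (p : String × PySem.Dict String String) (hp : p ∈ bagsD.items) :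
    p.2.items.length ≤ pvMaxFan bagsD := by
  obtain ⟨l⟩ := bagsD
  simp only [pvMaxFan]
  induction l with
  | nil => simp at hp
  | cons kv tl ih =>
    simp only [List.foldl_cons]
    rcases List.mem_cons.mp hp with h | h
    · subst h; exact le_trans (le_max_right _ _) (pvFan_le_foldl tl _)
    · exact le_trans (ih h) (pvFoldl_max_mono tl (Nat.zero_le _))

theorem pvGetD_fan_le (bagsD : PySem.Dict String (PySem.Dict String String)) (name : String) :
    ((bagsD.getD name PySem.Dict.empty).items).length ≤ pvMaxFan bagsD := by
  unfold PySem.Dict.getD PySem.Dict.get?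
  cases hf : bagsD.items.find? (fun p => p.1 == name) with
  | none => simp [PySem.Dict.empty]
  | some p =>
    simp only [Option.map_some, Option.getD_some]
    exact pvMaxFan_of_mem bagsD p (List.mem_of_find?_eq_some hf)

-- Stack-driven DFS loop of B: the list head is the stack top (Python keeps the top at
-- the list's end — push reversed, pop from the back — which reads the same way here).
def collectB_go (bagsD : PySem.Dict String (PySem.Dict String String))
    (stack : List (String × String × Int × Nat)) (results : List Int) : List Int :=
  match stack with
  | [] => results
  | (name, value, mult, fuel) :: rest =>
    let result := ((PySem.Int.ofStr? value).getD 0) * mult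
    let results := results ++ [result]
    if value ≠ "" then
      match fuel with
      | 0 => collectB_go bagsD rest results
      | f + 1 => collectB_go bagsD
          ((((bagsD.getD name PySem.Dict.empty).items).map (fun kv => (kv.1, kv.2, result, f))) ++ rest)
          results
    else collectB_go bagsD rest results
termination_by (stack.map (fun fr => (pvMaxFan bagsD + 1) ^ fr.2.2.2)).sum
decreasing_by
  · simp only [List.map_cons, List.sum_cons]
    exact Nat.lt_add_of_pos_left (Nat.pow_pos (by omega))
  · simp only [List.map_cons, List.sum_cons, List.map_append, List.sum_append, List.map_map]
    have h1 : (((bagsD.getD name PySem.Dict.empty).items).map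
        ((fun fr : String × String × Int × Nat => (pvMaxFan bagsD + 1) ^ fr.2.2.2) ∘
          (fun kv : String × String => (kv.1, kv.2, ((PySem.Int.ofStr? value).getD 0) * mult, f)))).sum
        = ((bagsD.getD name PySem.Dict.empty).items).length * (pvMaxFan bagsD + 1) ^ f := by
      rw [show ((fun fr : String × String × Int × Nat => (pvMaxFan bagsD + 1) ^ fr.2.2.2) ∘
            (fun kv : String × String => (kv.1, kv.2, ((PySem.Int.ofStr? value).getD 0) * mult, f)))
          = (fun _ : String × String => (pvMaxFan bagsD + 1) ^ f) from rfl]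
      rw [List.map_const', List.sum_replicate, smul_eq_mul]
    rw [h1]
    have h2 : ((bagsD.getD name PySem.Dict.empty).items).length * (pvMaxFan bagsD + 1) ^ f
        < (pvMaxFan bagsD + 1) ^ (f + 1) := by
      calc ((bagsD.getD name PySem.Dict.empty).items).length * (pvMaxFan bagsD + 1) ^ f
          ≤ pvMaxFan bagsD * (pvMaxFan bagsD + 1) ^ f :=
            Nat.mul_le_mul_right _ (pvGetD_fan_le bagsD name)
        _ < (pvMaxFan bagsD + 1) * (pvMaxFan bagsD + 1) ^ f :=
            Nat.mul_lt_mul_of_pos_right (by omega) (Nat.pow_pos (by omega))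
        _ = (pvMaxFan bagsD + 1) ^ (f + 1) := by rw [pow_succ]; ring
    simp only [Nat.succ_eq_add_one]
    omega
  · simp only [List.map_cons, List.sum_cons]
    exact Nat.lt_add_of_pos_left (Nat.pow_pos (by omega))

def collect_bags_in_shiny_gold_bag_alt (bag : List (String × String)) (bags : List (String × List (String × String))) (results : Option (List Int)) (multiplier : Int) : List Int :=
  let results0 := match results with | none => ([] : List Int) | some rs => rs
  let bagD := PySem.Dict.ofList bag
  let bagsD := PySem.Dict.ofList (bags.map (fun kv => (kv.1, PySem.Dict.ofList kv.2)))
  collectB_go bagsD (bagD.items.map (fun kv => (kv.1, kv.2, multiplier, bags.length + 1))) results0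

-- ===== PRECONDITION & SPEC =====
-- Names listed in a bag's entry of bags (its outgoing references).
def pvAdj (bagsD : PySem.Dict String (PySem.Dict String String)) (n : String) : List String :=
  ((bagsD.getD n PySem.Dict.empty).items).map Prod.fst

-- One step of the bounded graph closure: add every name referenced by a member.
def pvStep (bagsD : PySem.Dict String (PySem.Dict String String)) (S : PySem.Set String) : PySem.Set String :=
  S.foldl (fun acc n => PySem.Set.update acc (pvAdj bagsD n)) S

-- Names reachable from `start` through the reference graph of bags, by k closure steps
-- (k = bags.length + 1 saturates: any shortest path visits distinct bags keys).
def pvClosure (bagsD : PySem.Dict String (PySem.Dict String String)) (start : List String) : Nat → PySem.Set String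
  | 0 => PySem.Set.ofList start
  | k + 1 => pvStep bagsD (pvClosure bagsD start k)

-- Pre_ admits exactly the inputs on which Python A returns normally: it excludes those where
-- a reached value string is rejected by int() (ValueError; note int('') also fails, so every
-- successfully parsed edge is truthy and is recursed into), a reached name is missing from
-- bags (KeyError), or the reachable reference graph has a cycle (infinite recursion,
-- RecursionError) — all raising inputs, nothing A returns on.
def Pre_collect_bags_in_shiny_gold_bag (bag : List (String × String)) (bags : List (String × List (String × String))) (results : Option (List Int)) (multiplier : Int) : Prop :=
  (let bagD := PySem.Dict.ofList bag
   let bagsD := PySem.Dict.ofList (bags.map (fun kv => (kv.1, PySem.Dict.ofList kv.2)))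
   let R := pvClosure bagsD (bagD.items.map Prod.fst) (bags.length + 1)
   bagD.items.all (fun kv => (PySem.Int.ofStr? kv.2).isSome)
   && R.all (fun n =>
        bagsD.contains n
        && ((bagsD.getD n PySem.Dict.empty).items).all (fun kv => (PySem.Int.ofStr? kv.2).isSome)
        && !(PySem.Set.contains (pvClosure bagsD (pvAdj bagsD n) (bags.length + 1)) n))) = true
instance (bag : List (String × String)) (bags : List (String × List (String × String))) (results : Option (List Int)) (multiplier : Int) : Decidable (Pre_collect_bags_in_shiny_gold_bag bag bags results multiplier) := by unfold Pre_collect_bags_in_shiny_gold_bag; infer_instance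

def pvWitness_collect_bags_in_shiny_gold_bag : (List (String × String)) × (List (String × List (String × String))) × Option (List Int) × Int :=
  ([("a", "2")], [("a", [("b", "3")]), ("b", [])], none, 1)

def Spec_collect_bags_in_shiny_gold_bag (bag : List (String × String)) (bags : List (String × List (String × String))) (results : Option (List Int)) (multiplier : Int) (out : List Int) : Prop := out = collect_bags_in_shiny_gold_bag_alt bag bags results multiplier
instance (bag : List (String × String)) (bags : List (String × List (String × String))) (results : Option (List Int)) (multiplier : Int) (out : List Int) : Decidable (Spec_collect_bags_in_shiny_gold_bag bag bags results multiplier out) := by unfold Spec_collect_bags_in_shiny_gold_bag; infer_instance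

-- ===== CLAIM (what is proved, stated in full; the proofs are below) =====
def Claim_equal_collect_bags_in_shiny_gold_bag : Prop := ∀ (bag : List (String × String)) (bags : List (String × List (String × String))) (results : Option (List Int)) (multiplier : Int), Dom_collect_bags_in_shiny_gold_bag bag bags results multiplier → Pre_collect_bags_in_shiny_gold_bag bag bags results multiplier → Spec_collect_bags_in_shiny_gold_bag bag bags results multiplier (collect_bags_in_shiny_gold_bag bag bags results multiplier)

-- ===== LEMMAS AND PROOFS =====
-- Loop/recursion correspondence: running B's stack loop on the frames of one item list
-- (all sharing one multiplier and one fuel) on top of any `rest` equals first running A's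
-- recursion on that item list and then the loop on `rest`.
theorem collect_go_eq (fuel : Nat) :
    ∀ (items : List (String × String)) (bagsD : PySem.Dict String (PySem.Dict String String))
      (results : List Int) (mult : Int) (rest : List (String × String × Int × Nat)),
      collectB_go bagsD (items.map (fun kv => (kv.1, kv.2, mult, fuel)) ++ rest) results
        = collectB_go bagsD rest (collectA_go fuel items bagsD results mult) := by
  induction fuel with
  | zero =>
    intro items bagsD results mult rest
    induction items generalizing results rest with
    | nil => simp [collectA_go]
    | cons hd tl ih =>
      obtain ⟨name, value⟩ := hd
      simp only [List.map_cons, List.cons_append]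
      rw [collectB_go, collectA_go]
      by_cases hv : value = ""
      · simp only [hv, ne_eq, not_true_eq_false, if_false]
        exact ih _ _
      · simp only [ne_eq, hv, not_false_eq_true, if_true]
        exact ih _ _
  | succ f ihf =>
    intro items bagsD results mult rest
    induction items generalizing results rest with
    | nil => simp [collectA_go]
    | cons hd tl ih =>
      obtain ⟨name, value⟩ := hd
      simp only [List.map_cons, List.cons_append]
      rw [collectB_go, collectA_go]
      by_cases hv : value = ""
      · simp only [hv, ne_eq, not_true_eq_false, if_false]
        exact ih _ _
      · simp only [ne_eq, hv, not_false_eq_true, if_true]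
        rw [ihf, ih]

-- ===== VERDICT (by name: the statement is the Claim_ definition above) =====
theorem collect_bags_in_shiny_gold_bag_spec : Claim_equal_collect_bags_in_shiny_gold_bag := by
  intro bag bags results multiplier _ _
  unfold Spec_collect_bags_in_shiny_gold_bag collect_bags_in_shiny_gold_bag collect_bags_in_shiny_gold_bag_alt
  cases results <;>
    (dsimp only
     conv_rhs => rw [← List.append_nil (List.map (fun kv =>
       (kv.1, kv.2, multiplier, bags.length + 1)) (PySem.Dict.ofList bag).items)]
     rw [collect_go_eq]
     simp [collectB_go])
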